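-- pv_equiv track=rewrite | github.com/NutthanichN/grading-helper | week_6/6210546005_lab6.py | front_x
-- ===== SOURCE A (Python) =====
-- def front_x(list):
--     """
--
--     >>> x = ['siam','ciao','xiao','nongt']
--     >>> front_x(x)
--     ['xiao', 'ciao', 'nongt', 'siam']
--     >>> y = ['bandori','poppipa','roselia','pas*pale','afterglow','hellohappy']
--     >>> front_x(y)
--     ['afterglow', 'bandori', 'hellohappy', 'pas*pale', 'poppipa', 'roselia']
--     >>> front_x(['coup_de_grace','phantasm','XD','x_mark'])
--     ['XD', 'x_mark', 'coup_de_grace', 'phantasm']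
--     >>> front_x(['BigB','smalls','x is small','X is big','something like that'])
--     ['X is big', 'x is small', 'BigB', 'smalls', 'something like that']
--     >>> front_x(['sleepy','feel','I','really','zzzz~~~~','xxx then'])
--     ['xxx then', 'I', 'feel', 'really', 'sleepy', 'zzzz~~~~']
--     """
--     x_list = []
--     non_x = []
--     for i in range(len(list)):
--         if (list[i])[0].lower() == 'x':
--             x_list.append(list[i])
--         else:
--             non_x.append(list[i])
--     x_list.sort()
--     non_x.sort()
--     x_list.extend(non_x)
--     return (x_list)
-- ===== SOURCE B (Python) =====
-- def front_x(list):
--     return sorted(list, key=lambda s: (s[0].lower() != 'x', s))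
-- ===== Notes on version B (the rewrite author's own statement) =====
-- stated objective: simpler
-- what changed: The explicit partition into two lists followed by two separate in-place sorts and an extend is replaced by a single sorted() call with the composite key (s[0].lower() != 'x', s), so the bucketing control flow disappears.
import Mathlib
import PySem

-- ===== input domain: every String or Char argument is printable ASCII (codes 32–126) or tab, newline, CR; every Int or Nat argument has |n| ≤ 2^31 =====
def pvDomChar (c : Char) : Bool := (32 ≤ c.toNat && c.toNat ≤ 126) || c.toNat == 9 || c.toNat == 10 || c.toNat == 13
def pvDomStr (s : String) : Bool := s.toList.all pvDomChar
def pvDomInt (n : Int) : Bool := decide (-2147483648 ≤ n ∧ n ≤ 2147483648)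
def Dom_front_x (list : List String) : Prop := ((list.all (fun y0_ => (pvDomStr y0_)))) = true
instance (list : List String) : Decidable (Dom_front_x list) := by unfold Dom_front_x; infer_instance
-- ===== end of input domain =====

-- B replaces A's partition-and-two-sorts with one sorted() call using the composite key (s[0].lower() != 'x', s): simpler, same cost.

-- ===== PORT A =====
-- A's test (list[i])[0].lower() == 'x'; `false` stands where the Python raises IndexError on "" (excluded by Pre_)
def axTest (s : String) : Bool :=
  match PySem.Str.pyGet? s 0 with
  | some c => PySem.Chars.lower [c] == ['x']
  | none => false

def front_x (list : List String) : List String :=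
  let st := (PySem.List.pyRange 0 (PySem.List.len list)).foldl
    (fun (acc : List String × List String) i =>
      if axTest (PySem.List.pyGetD list i "") then
        (acc.1 ++ [PySem.List.pyGetD list i ""], acc.2)
      else
        (acc.1, acc.2 ++ [PySem.List.pyGetD list i ""]))
    ([], [])
  PySem.List.sorted st.1 (fun x => x) ++ PySem.List.sorted st.2 (fun x => x)

-- ===== PORT B =====
-- B's first key component s[0].lower() != 'x'; `true` stands where the Python raises IndexError on "" (excluded by Pre_)
def bxKey (s : String) : Bool :=
  match PySem.Str.pyGet? s 0 with
  | some c => !(PySem.Chars.lower [c] == ['x'])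
  | none => true

def front_x_alt (list : List String) : List String :=
  PySem.List.sorted2 list (fun s => bxKey s) (fun s => s)

-- ===== PRECONDITION & SPEC =====
-- Pre_ excludes lists containing the empty string: there Python A raises IndexError on s[0] (and Python B raises too).
def Pre_front_x (list : List String) : Prop := "" ∉ list
instance (list : List String) : Decidable (Pre_front_x list) := by unfold Pre_front_x; infer_instance
def pvWitness_front_x : List String := ["siam", "ciao", "xiao", "nongt"]

def Spec_front_x (list : List String) (out : List String) : Prop := out = front_x_alt list
instance (list : List String) (out : List String) : Decidable (Spec_front_x list out) := by unfold Spec_front_x; infer_instance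

-- ===== CLAIM (what is proved, stated in full; the proofs are below) =====
def Claim_equal_front_x : Prop := ∀ (list : List String), Dom_front_x list → Pre_front_x list → Spec_front_x list (front_x list)

-- ===== LEMMAS AND PROOFS =====

theorem bxKey_eq_not_axTest (s : String) : bxKey s = !axTest s := by
  unfold bxKey axTest
  cases PySem.Str.pyGet? s 0 <;> simp

-- the composite key of B, valued in the lexicographic order on Bool × String
def lexKey (s : String) : Lex (Bool × String) := toLex (bxKey s, s)

theorem lexKey_injective : Function.Injective lexKey := by
  intro a b h
  simpa [lexKey] using congrArg (fun x => (ofLex x).2) h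

theorem alt_eq_sorted (list : List String) :
    front_x_alt list = PySem.List.sorted list lexKey := by
  have hbf : (fun a b : String =>
        decide (bxKey a < bxKey b) || (!decide (bxKey b < bxKey a) && decide (a < b)))
      = fun a b : String => decide (lexKey a < lexKey b) := by
    funext a b
    rw [Bool.eq_iff_iff]
    simp only [Bool.or_eq_true, Bool.and_eq_true, Bool.not_eq_true', decide_eq_true_iff,
      decide_eq_false_iff_not, lexKey, Prod.Lex.toLex_lt_toLex]
    cases hA : bxKey a <;> cases hB : bxKey b <;> simp
  unfold front_x_alt PySem.List.sorted2
  rw [PySem.List.sorted_eq_foldl_insertBy]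
  simp only [Bool.false_eq_true, if_false]
  beta_reduce
  rw [hbf]

theorem a_eq_sorted_filters (list : List String) :
    front_x list =
      PySem.List.sorted (list.filter axTest) (fun x => x) ++
      PySem.List.sorted (list.filter (fun s => !axTest s)) (fun x => x) := by
  unfold front_x
  simp only [PySem.List.len_eq]
  rw [PySem.List.foldl_pyRange_zero_pyGetD' list ""
      (fun (acc : List String × List String) s =>
        if axTest s then (acc.1 ++ [s], acc.2) else (acc.1, acc.2 ++ [s])) ([], [])]
  have hfun : (fun (acc : List String × List String) s =>
        if axTest s then (acc.1 ++ [s], acc.2) else (acc.1, acc.2 ++ [s]))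
      = fun acc s => (if axTest s then acc.1 ++ [s] else acc.1,
                      if (!axTest s) then acc.2 ++ [s] else acc.2) := by
    funext acc s
    by_cases h : axTest s <;> simp [h]
  rw [hfun,
      PySem.List.foldl_prod_mk (f := fun a e => if axTest e then a ++ [e] else a)
        (g := fun a e => if (!axTest e) then a ++ [e] else a),
      PySem.List.foldl_append_if_eq_filter axTest,
      PySem.List.foldl_append_if_eq_filter (fun e => !axTest e)]
  simp

theorem mem_sorted_filter_key {p : String → Bool} {a : String} {list : List String}
    (h : a ∈ PySem.List.sorted (list.filter p) (fun x => x)) : p a = true := by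
  rw [PySem.List.mem_sorted] at h
  exact (List.mem_filter.mp h).2

-- ===== VERDICT (by name: the statement is the Claim_ definition above) =====
theorem front_x_spec : Claim_equal_front_x := by
  intro list _ _
  unfold Spec_front_x
  rw [a_eq_sorted_filters, alt_eq_sorted]
  apply PySem.List.eq_of_perm_of_pairwise_le_of_injective lexKey lexKey_injective
  · exact (((PySem.List.sorted_perm _ _ _).append (PySem.List.sorted_perm _ _ _)).trans
      (List.filter_append_perm _ _)).trans (PySem.List.sorted_perm _ _ _).symm
  · rw [List.pairwise_append]
    refine ⟨?_, ?_, ?_⟩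
    · have hp := PySem.List.sorted_pairwise (xs := list.filter axTest) (key := fun x => x)
      refine hp.imp_of_mem ?_
      intro a b ha hb hab
      have ka : bxKey a = false := by simp [bxKey_eq_not_axTest, mem_sorted_filter_key ha]
      have kb : bxKey b = false := by simp [bxKey_eq_not_axTest, mem_sorted_filter_key hb]
      simp [lexKey, Prod.Lex.toLex_le_toLex, ka, kb, hab]
    · have hp := PySem.List.sorted_pairwise (xs := list.filter (fun s => !axTest s)) (key := fun x => x)
      refine hp.imp_of_mem ?_
      intro a b ha hb hab
      have ka : bxKey a = true := by
        have := mem_sorted_filter_key ha; simp at this; simp [bxKey_eq_not_axTest, this]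
      have kb : bxKey b = true := by
        have := mem_sorted_filter_key hb; simp at this; simp [bxKey_eq_not_axTest, this]
      simp [lexKey, Prod.Lex.toLex_le_toLex, ka, kb, hab]
    · intro a ha b hb
      have ka : bxKey a = false := by simp [bxKey_eq_not_axTest, mem_sorted_filter_key ha]
      have kb : bxKey b = true := by
        have := mem_sorted_filter_key hb; simp at this; simp [bxKey_eq_not_axTest, this]
      simp [lexKey, Prod.Lex.toLex_le_toLex, ka, kb]
  · exact PySem.List.sorted_pairwise (xs := list) (key := lexKey)
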